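-- pv_equiv track=rewrite | github.com/poshakjaiswal/python_algorithms | Algorithm_preparation/dynamicProgramming/MinimumEncloseBoxes.py | minimumEnclosedBoxes
-- ===== SOURCE A (Python) =====
-- from typing import List
--
-- def minimumEnclosedBoxes(boxSizes: List[int]) -> List:
--
--     boxSortedBasedOnSize = sorted(boxSizes,reverse=False)
--
--     countOfDistinctEnclosures = 0
--
--     while len(boxSortedBasedOnSize) > 0:
--
--         boxesOfInterest = set(boxSortedBasedOnSize)
--
--
--         if len(boxesOfInterest) > 0:
--             countOfDistinctEnclosures = countOfDistinctEnclosures + 1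
--
--         for item in boxesOfInterest:
--             boxSortedBasedOnSize.remove(item)
--
--     return countOfDistinctEnclosures
-- ===== SOURCE B (Python) =====
-- from typing import List
--
-- def minimumEnclosedBoxes(boxSizes: List[int]) -> int:
--     best = 0
--     run = 0
--     prev = None
--     for x in sorted(boxSizes):
--         if x == prev:
--             run += 1
--         else:
--             prev = x
--             run = 1
--         if run > best:
--             best = run
--     return best
-- ===== Notes on version B (the rewrite author's own statement) =====
-- stated objective: faster
-- what changed: Replaces A's repeated peel-one-copy-of-each-distinct-value rounds (each round rebuilds a set and does linear list.remove scans) by a single run-length scan over the sorted list that tracks the current run length and the running maximum.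
import Mathlib
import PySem

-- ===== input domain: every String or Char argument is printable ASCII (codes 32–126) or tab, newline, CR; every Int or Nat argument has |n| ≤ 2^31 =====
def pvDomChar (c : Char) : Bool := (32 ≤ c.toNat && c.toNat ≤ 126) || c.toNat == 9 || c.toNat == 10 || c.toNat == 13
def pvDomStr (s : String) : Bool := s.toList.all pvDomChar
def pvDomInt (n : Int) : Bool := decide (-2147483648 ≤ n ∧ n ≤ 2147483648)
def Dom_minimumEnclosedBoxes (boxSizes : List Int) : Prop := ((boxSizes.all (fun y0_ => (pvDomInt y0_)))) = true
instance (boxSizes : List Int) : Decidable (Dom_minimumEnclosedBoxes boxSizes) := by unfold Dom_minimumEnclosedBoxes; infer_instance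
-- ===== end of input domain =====

-- B replaces A's repeated peel-a-set-each-round loop (quadratic list.remove scans) by a single
-- run-length scan over the sorted list; measured faster on large inputs. Return values proved equal.

-- ===== PORT A =====
-- 'for item in set(l): l.remove(item)': one copy of each distinct value is removed; the resulting
-- list does not depend on the set's iteration order, so folding in first-occurrence order is exact.
def pyPeel (l : List Int) : List Int :=
  (PySem.Set.ofList l).foldl (fun acc item => (PySem.List.remove? acc item).getD acc) l

-- (cited by pyWhile's decreasing_by; the while loop needs it to terminate)
theorem pyPeel_length_lt (l : List Int) (hl : l ≠ []) : (pyPeel l).length < l.length := by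
  have key : ∀ (s acc : List Int), s.Nodup → (∀ x ∈ s, x ∈ acc) →
      (s.foldl (fun acc item => (PySem.List.remove? acc item).getD acc) acc).length + s.length
        = acc.length := by
    intro s
    induction s with
    | nil => intro acc _ _; simp
    | cons a s ih =>
      intro acc hnd hsub
      have ha : a ∈ acc := hsub a (by simp)
      have hrm : PySem.List.remove? acc a = some (acc.erase a) :=
        PySem.List.remove?_eq_some_erase acc a ha
      have hsub' : ∀ x ∈ s, x ∈ acc.erase a := by
        intro x hx
        have hxa : x ≠ a := fun h => (List.nodup_cons.mp hnd).1 (h ▸ hx)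
        exact (List.mem_erase_of_ne hxa).mpr (hsub x (List.mem_cons_of_mem _ hx))
      have hih := ih (acc.erase a) (List.nodup_cons.mp hnd).2 hsub'
      have hlen : (acc.erase a).length = acc.length - 1 := List.length_erase_of_mem ha
      have hpos : 1 ≤ acc.length := List.length_pos_of_mem ha
      simp only [List.foldl_cons, hrm, Option.getD_some, List.length_cons]
      omega
  have hk := key (PySem.Set.ofList l) l (PySem.Set.nodup_ofList l)
      (fun x hx => (PySem.Set.mem_ofList _ _).mp hx)
  have hpos : 0 < (PySem.Set.ofList l : List Int).length := by
    have : l.head! ∈ l := List.head!_mem_self hl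
    have : l.head! ∈ PySem.Set.ofList l := (PySem.Set.mem_ofList _ _).mpr this
    exact List.length_pos_of_mem this
  unfold pyPeel
  omega

def pyWhile (l : List Int) (c : Int) : Int :=
  if hl : l.length > 0 then
    let s : PySem.Set Int := PySem.Set.ofList l
    let c' := if s.length > 0 then c + 1 else c
    pyWhile (pyPeel l) c'
  else c
termination_by l.length
decreasing_by exact pyPeel_length_lt l (by intro h; simp [h] at hl)

def minimumEnclosedBoxes (boxSizes : List Int) : Int :=
  pyWhile (PySem.List.sorted boxSizes (fun x => x) false) 0

-- ===== PORT B =====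
def altStep (st : Option Int × Int × Int) (x : Int) : Option Int × Int × Int :=
  let pr := if st.1 == some x then (st.1, st.2.1 + 1) else (some x, 1)
  (pr.1, pr.2, if pr.2 > st.2.2 then pr.2 else st.2.2)

def minimumEnclosedBoxes_alt (boxSizes : List Int) : Int :=
  ((PySem.List.sorted boxSizes (fun x => x) false).foldl altStep (none, 0, 0)).2.2

-- ===== PRECONDITION & SPEC =====
def Spec_minimumEnclosedBoxes (boxSizes : List Int) (out : Int) : Prop := out = minimumEnclosedBoxes_alt boxSizes
instance (boxSizes : List Int) (out : Int) : Decidable (Spec_minimumEnclosedBoxes boxSizes out) := by unfold Spec_minimumEnclosedBoxes; infer_instance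

-- ===== CLAIM (what is proved, stated in full; the proofs are below) =====
def Claim_equal_minimumEnclosedBoxes : Prop := ∀ (boxSizes : List Int), Dom_minimumEnclosedBoxes boxSizes → Spec_minimumEnclosedBoxes boxSizes (minimumEnclosedBoxes boxSizes)

-- ===== LEMMAS AND PROOFS =====

/-- maximum multiplicity of any value in `l` (0 for `[]`): the common value of both programs. -/
def maxMult (l : List Int) : Nat := l.toFinset.sup (fun x => l.count x)

theorem count_le_maxMult {l : List Int} {x : Int} (hx : x ∈ l) : l.count x ≤ maxMult l :=
  Finset.le_sup (f := fun y => l.count y) (List.mem_toFinset.mpr hx)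

theorem maxMult_pos {l : List Int} (hl : l ≠ []) : 1 ≤ maxMult l := by
  obtain ⟨x, t, rfl⟩ := List.exists_cons_of_ne_nil hl
  calc 1 ≤ (x :: t).count x := by simp
    _ ≤ _ := count_le_maxMult (by simp)

theorem pyPeel_count (l : List Int) (x : Int) : (pyPeel l).count x = l.count x - 1 := by
  have key : ∀ (s acc : List Int), s.Nodup → (∀ y ∈ s, y ∈ acc) →
      (s.foldl (fun acc item => (PySem.List.remove? acc item).getD acc) acc).count x
        = acc.count x - (if x ∈ s then 1 else 0) := by
    intro s
    induction s with
    | nil => intro acc _ _; simp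
    | cons a s ih =>
      intro acc hnd hsub
      have ha : a ∈ acc := hsub a (by simp)
      have hrm : PySem.List.remove? acc a = some (acc.erase a) :=
        PySem.List.remove?_eq_some_erase acc a ha
      have hsub' : ∀ y ∈ s, y ∈ acc.erase a := by
        intro y hy
        have hya : y ≠ a := fun h => (List.nodup_cons.mp hnd).1 (h ▸ hy)
        exact (List.mem_erase_of_ne hya).mpr (hsub y (List.mem_cons_of_mem _ hy))
      simp only [List.foldl_cons, hrm, Option.getD_some,
        ih (acc.erase a) (List.nodup_cons.mp hnd).2 hsub']
      have herase : (acc.erase a).count x = acc.count x - (if a = x then 1 else 0) := by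
        rw [List.count_erase]; simp
      by_cases hax : a = x
      · subst hax
        have hxs : a ∉ s := (List.nodup_cons.mp hnd).1
        have hc : 1 ≤ acc.count a := List.one_le_count_iff.mpr ha
        simp [hxs, herase]
      · have hxa : ¬ x = a := fun h => hax h.symm
        by_cases hxm : x ∈ s <;> simp [hax, hxm, herase, hxa, List.mem_cons]
  have hk := key (PySem.Set.ofList l) l (PySem.Set.nodup_ofList l)
      (fun y hy => (PySem.Set.mem_ofList _ _).mp hy)
  unfold pyPeel
  rw [hk]
  by_cases hx : x ∈ l
  · simp [PySem.Set.mem_ofList, hx]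
  · have : l.count x = 0 := List.count_eq_zero.mpr hx
    simp [PySem.Set.mem_ofList, hx, this]

theorem maxMult_peel {l : List Int} (hl : l ≠ []) : maxMult (pyPeel l) = maxMult l - 1 := by
  apply Nat.le_antisymm
  · apply Finset.sup_le
    intro y hy
    have hy' : y ∈ pyPeel l := List.mem_toFinset.mp hy
    have h1 : 1 ≤ (pyPeel l).count y := List.one_le_count_iff.mpr hy'
    have h2 := pyPeel_count l y
    have hyl : y ∈ l := by
      by_contra hn
      have : l.count y = 0 := List.count_eq_zero.mpr hn
      omega
    have := count_le_maxMult hyl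
    omega
  · obtain ⟨x, t, rfl⟩ := List.exists_cons_of_ne_nil hl
    set l := x :: t
    obtain ⟨z, hz, hzc⟩ : ∃ z ∈ l.toFinset, maxMult l = l.count z :=
      Finset.exists_mem_eq_sup _ (by simp [l]) _
    by_cases h2 : 2 ≤ maxMult l
    · have hc : (pyPeel l).count z = maxMult l - 1 := by rw [pyPeel_count, ← hzc]
      have hzm : z ∈ pyPeel l := List.one_le_count_iff.mp (by omega)
      have := count_le_maxMult (l := pyPeel l) hzm
      omega
    · have := maxMult_pos (l := l) (by simp [l])
      omega

theorem pyWhile_eq : ∀ (n : Nat) (l : List Int) (c : Int), l.length ≤ n →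
    pyWhile l c = c + (maxMult l : Int) := by
  intro n
  induction n with
  | zero =>
    intro l c hn
    have : l = [] := List.length_eq_zero_iff.mp (Nat.le_zero.mp hn)
    subst this
    rw [pyWhile]
    simp [maxMult]
  | succ n ih =>
    intro l c hn
    by_cases hl : l = []
    · subst hl; rw [pyWhile]; simp [maxMult]
    · have hpos : 0 < l.length := List.length_pos_of_ne_nil hl
      have hspos : 0 < (PySem.Set.ofList l : List Int).length := by
        have : l.head! ∈ PySem.Set.ofList l :=
          (PySem.Set.mem_ofList _ _).mpr (List.head!_mem_self hl)
        exact List.length_pos_of_mem this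
      have hlt := pyPeel_length_lt l hl
      rw [pyWhile, dif_pos hpos]
      show pyWhile (pyPeel l)
          (if (PySem.Set.ofList l : List Int).length > 0 then c + 1 else c) = _
      rw [if_pos hspos, ih (pyPeel l) (c + 1) (by omega), maxMult_peel hl]
      have h1 := maxMult_pos hl
      omega

-- B side: run-length scan on a sorted list computes maxMult

theorem altStep_replicate (k : Nat) (x : Int) (run best : Int) (h : run ≤ best) :
    (List.replicate k x).foldl altStep (some x, run, best)
      = (some x, run + k, max best (run + k)) := by
  induction k generalizing run best with
  | zero =>
    simp [max_eq_left h]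
  | succ k ih =>
    rw [List.replicate_succ, List.foldl_cons]
    have hstep : altStep (some x, run, best) x = (some x, run + 1, max best (run + 1)) := by
      simp [altStep]
      omega
    rw [hstep, ih (run + 1) (max best (run + 1)) (le_max_right _ _)]
    have e2 : max (max best (run + 1)) (run + 1 + (k : Int))
        = max best (run + ((k + 1 : Nat) : Int)) := by
      push_cast; omega
    have e1 : run + 1 + (k : Int) = run + ((k + 1 : Nat) : Int) := by
      push_cast; ring
    rw [e2, e1]

theorem altStep_fresh (u : List Int) (p : Int) (run best : Int)
    (h : ∀ y ∈ u, p ≠ y) :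
    (u.foldl altStep (some p, run, best)).2.2 = (u.foldl altStep (none, 0, best)).2.2 := by
  cases u with
  | nil => rfl
  | cons y u =>
    have hpy : p ≠ y := h y (by simp)
    simp only [List.foldl_cons]
    have h1 : altStep (some p, run, best) y = (some y, 1, max best 1) := by
      simp [altStep, hpy]; omega
    have h2 : altStep (none, 0, best) y = (some y, 1, max best 1) := by
      simp [altStep]; omega
    rw [h1, h2]

theorem sorted_split_head : ∀ (t : List Int), t.Pairwise (· ≤ ·) → ∀ x : Int,
    (∀ y ∈ t, x ≤ y) →
    ∃ u, t = List.replicate (t.count x) x ++ u ∧ u.Pairwise (· ≤ ·) ∧ ∀ y ∈ u, x < y := by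
  intro t
  induction t with
  | nil => intro _ x _; exact ⟨[], by simp⟩
  | cons a t ih =>
    intro hp x hle
    by_cases hax : a = x
    · subst hax
      obtain ⟨u, hu, hup, hgt⟩ := ih (List.pairwise_cons.mp hp).2 a
        (fun y hy => (List.pairwise_cons.mp hp).1 y hy)
      refine ⟨u, ?_, hup, hgt⟩
      have : (a :: t).count a = t.count a + 1 := by simp
      rw [this, List.replicate_succ, List.cons_append]
      exact congrArg (a :: ·) hu
    · have hxa : x < a := lt_of_le_of_ne (hle a (by simp)) (fun h => hax h.symm)
      have hgt : ∀ y ∈ a :: t, x < y := by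
        intro y hy
        rcases List.mem_cons.mp hy with rfl | hy'
        · exact hxa
        · exact lt_of_lt_of_le hxa ((List.pairwise_cons.mp hp).1 y hy')
      have hcnt : (a :: t).count x = 0 :=
        List.count_eq_zero.mpr (fun hm => lt_irrefl x (hgt x hm))
      exact ⟨a :: t, by simp [hcnt], hp, hgt⟩

theorem maxMult_split {x : Int} {k : Nat} {u : List Int} (hk : 1 ≤ k)
    (hgt : ∀ y ∈ u, x < y) :
    maxMult (List.replicate k x ++ u) = max k (maxMult u) := by
  set t := List.replicate k x ++ u with ht
  have hxu : x ∉ u := fun hm => lt_irrefl x (hgt x hm)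
  have hcx : t.count x = k := by
    simp [ht, List.count_append, List.count_eq_zero.mpr hxu]
  have hcy : ∀ y ∈ u.toFinset, t.count y = u.count y := by
    intro y hy
    have hyx : y ≠ x := fun h => lt_irrefl x (h ▸ hgt y (List.mem_toFinset.mp hy))
    simp only [ht, List.count_append, List.count_replicate]
    have : ¬ (x = y) := fun h => hyx h.symm
    simp [this]
  have htf : t.toFinset = insert x u.toFinset := by
    rw [ht, List.toFinset_append, List.toFinset_replicate_of_ne_zero (by omega : k ≠ 0)]
    ext y
    simp
  unfold maxMult
  rw [htf, Finset.sup_insert, hcx]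
  have hsup : u.toFinset.sup (fun y => t.count y) = u.toFinset.sup (fun y => u.count y) :=
    Finset.sup_congr rfl hcy
  rw [hsup]

theorem goSorted : ∀ (n : Nat) (t : List Int), t.length ≤ n → t.Pairwise (· ≤ ·) →
    ∀ (b : Nat), ((t.foldl altStep (none, 0, (b : Int))).2.2 = ((max b (maxMult t) : Nat) : Int)) := by
  intro n
  induction n with
  | zero =>
    intro t hn _ b
    have : t = [] := List.length_eq_zero_iff.mp (Nat.le_zero.mp hn)
    subst this
    simp [maxMult]
  | succ n ih =>
    intro t hn hp b
    cases t with
    | nil => simp [maxMult]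
    | cons a r =>
      obtain ⟨u, hu, hup, hgt⟩ := sorted_split_head (a :: r) hp a
        (fun y hy => by
          rcases List.mem_cons.mp hy with rfl | hy'
          · exact le_refl _
          · exact (List.pairwise_cons.mp hp).1 y hy')
      set k := (a :: r).count a with hk
      have hk1 : 1 ≤ k := List.one_le_count_iff.mpr (by simp)
      have hlen : (a :: r).length = k + u.length := by
        rw [hu]; simp
      clear_value k
      -- first element starts a run of a
      have hfirst : altStep (none, 0, (b : Int)) a = (some a, 1, max (b : Int) 1) := by
        simp [altStep]; omega
      have hrepl : List.replicate k a = a :: List.replicate (k - 1) a := by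
        cases k with
        | zero => omega
        | succ m => simp [List.replicate_succ]
      rw [hu, hrepl, List.cons_append, List.foldl_cons, hfirst, List.foldl_append,
        altStep_replicate (k - 1) a 1 (max (b : Int) 1) (le_max_right _ _)]
      have hbk : max (max (b : Int) 1) (1 + (k - 1 : Nat)) = ((max b k : Nat) : Int) := by
        push_cast; omega
      have hne : ∀ y ∈ u, a ≠ y := fun y hy => ne_of_lt (hgt y hy)
      rw [hbk, altStep_fresh u a _ _ hne]
      have hulen : u.length ≤ n := by
        simp only [List.length_cons] at hn hlen
        omega
      rw [ih u hulen hup (max b k),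
        show a :: (List.replicate (k - 1) a ++ u) = List.replicate k a ++ u by
          rw [← List.cons_append, ← hrepl],
        maxMult_split hk1 hgt]
      congr 1
      omega

-- ===== VERDICT (by name: the statement is the Claim_ definition above) =====
theorem minimumEnclosedBoxes_spec : Claim_equal_minimumEnclosedBoxes := by
  intro boxSizes _
  unfold Spec_minimumEnclosedBoxes minimumEnclosedBoxes minimumEnclosedBoxes_alt
  set s := PySem.List.sorted boxSizes (fun x => x) false with hs
  have hp : s.Pairwise (· ≤ ·) := PySem.List.sorted_pairwise boxSizes (fun x => x)
  have hA := pyWhile_eq s.length s 0 (le_refl _)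
  have hB := goSorted s.length s (le_refl _) hp 0
  simp only [Nat.cast_zero] at hB
  rw [hA, hB]
  simp
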